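-- pv_equiv track=rewrite | github.com/EdmondVirelle/vault-ui-refactor | scripts/裝備-修補類型.py | remap_equips
-- ===== SOURCE A (Python) =====
-- OLD_SLOT_COUNT = 9
--
-- NEW_SLOT_COUNT = 7
--
-- SLOT_MAP = {0: 0, 1: 1, 2: 2, 3: 5, 4: 6, 5: 7, 6: 8}
--
-- def remap_equips(old_equips: list) -> list:
--     """Remap an equips array from 9-slot to 7-slot layout."""
--     # Pad old array to 9 if shorter
--     padded = list(old_equips) + [0] * (OLD_SLOT_COUNT - len(old_equips))
--     new_equips = []
--     for new_i in range(NEW_SLOT_COUNT):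
--         old_i = SLOT_MAP[new_i]
--         if old_i < len(padded):
--             new_equips.append(padded[old_i])
--         else:
--             new_equips.append(0)
--     return new_equips
-- ===== SOURCE B (Python) =====
-- OLD_SLOT_COUNT = 9
--
-- def remap_equips(old_equips: list) -> list:
--     """Remap an equips array from 9-slot to 7-slot layout."""
--     # Pad to 9 slots, then take the two contiguous mapped ranges 0..2 and 5..8.
--     padded = list(old_equips) + [0] * (OLD_SLOT_COUNT - len(old_equips))
--     return padded[:3] + padded[5:9]
-- ===== Notes on version B (the rewrite author's own statement) =====
-- stated objective: simpler
-- what changed: Replaces the SLOT_MAP dict lookup loop with two slice concatenations over the padded array, exploiting that the mapped old indices are the contiguous ranges 0..2 and 5..8.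
import Mathlib
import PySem

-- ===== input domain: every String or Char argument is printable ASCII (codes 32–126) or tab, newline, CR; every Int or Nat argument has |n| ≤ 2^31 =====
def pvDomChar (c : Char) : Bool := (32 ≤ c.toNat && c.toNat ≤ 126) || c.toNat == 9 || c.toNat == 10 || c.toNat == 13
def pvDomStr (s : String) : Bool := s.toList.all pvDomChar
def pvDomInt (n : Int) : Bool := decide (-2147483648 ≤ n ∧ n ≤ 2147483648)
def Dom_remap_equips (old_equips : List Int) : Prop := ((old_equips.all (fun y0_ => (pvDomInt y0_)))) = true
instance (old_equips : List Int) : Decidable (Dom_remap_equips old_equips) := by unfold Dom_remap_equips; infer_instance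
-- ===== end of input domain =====

-- B replaces A's SLOT_MAP dict-lookup loop with two slice concatenations over the padded list (objective: simpler).
-- ===== PORT A =====
def pySLOT_MAP : PySem.Dict Int Int :=
  PySem.Dict.ofList [(0, 0), (1, 1), (2, 2), (3, 5), (4, 6), (5, 7), (6, 8)]

-- one iteration of A's loop body
def remapStep (padded : List Int) (new_equips : List Int) (new_i : Int) : List Int :=
  -- SLOT_MAP[new_i]: the key is always present for new_i in range(7), so getD never uses its default
  let old_i := (PySem.Dict.get? pySLOT_MAP new_i).getD 0
  if old_i < (padded.length : Int) then
    new_equips ++ [(PySem.List.pyGet? padded old_i).getD 0]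
  else
    new_equips ++ [0]

def remap_equips (old_equips : List Int) : List Int :=
  let padded := old_equips ++ List.replicate (Int.toNat (9 - (old_equips.length : Int))) 0
  (PySem.List.pyRange 0 7 1).foldl (remapStep padded) []

-- ===== PORT B =====
def remap_equips_alt (old_equips : List Int) : List Int :=
  let padded := old_equips ++ List.replicate (Int.toNat (9 - (old_equips.length : Int))) 0
  PySem.List.slice padded none (some 3) ++ PySem.List.slice padded (some 5) (some 9)

-- ===== PRECONDITION & SPEC =====
def Spec_remap_equips (old_equips : List Int) (out : List Int) : Prop := out = remap_equips_alt old_equips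
instance (old_equips : List Int) (out : List Int) : Decidable (Spec_remap_equips old_equips out) := by unfold Spec_remap_equips; infer_instance

-- ===== CLAIM (what is proved, stated in full; the proofs are below) =====
def Claim_equal_remap_equips : Prop := ∀ (old_equips : List Int), Dom_remap_equips old_equips → Spec_remap_equips old_equips (remap_equips old_equips)

-- ===== LEMMAS AND PROOFS =====
theorem range07 : PySem.List.pyRange 0 7 1 = [0, 1, 2, 3, 4, 5, 6] := by
  rw [PySem.List.pyRange_one]; decide

theorem slot0 : PySem.Dict.get? pySLOT_MAP 0 = some 0 := by decide
theorem slot1 : PySem.Dict.get? pySLOT_MAP 1 = some 1 := by decide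
theorem slot2 : PySem.Dict.get? pySLOT_MAP 2 = some 2 := by decide
theorem slot3 : PySem.Dict.get? pySLOT_MAP 3 = some 5 := by decide
theorem slot4 : PySem.Dict.get? pySLOT_MAP 4 = some 6 := by decide
theorem slot5 : PySem.Dict.get? pySLOT_MAP 5 = some 7 := by decide
theorem slot6 : PySem.Dict.get? pySLOT_MAP 6 = some 8 := by decide

-- A's loop, evaluated on any list of length ≥ 9, equals B's two slices.
theorem core (p : List Int) (hp : 9 ≤ p.length) :
    (PySem.List.pyRange 0 7 1).foldl (remapStep p) [] =
      PySem.List.slice p none (some 3) ++ PySem.List.slice p (some 5) (some 9) := by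
  match p, hp with
  | a::b::c::d::e::f::g::h::i::rest, _ =>
    have hlen : ((a::b::c::d::e::f::g::h::i::rest).length : Int) = 9 + (rest.length : Int) := by
      simp only [List.length_cons]; push_cast; ring
    have hc : ∀ k : Int, k ≤ 8 → k < ((a::b::c::d::e::f::g::h::i::rest).length : Int) := by
      intro k hk
      have h0 : (0:Int) ≤ (rest.length : Int) := Int.natCast_nonneg _
      omega
    have hget : ∀ (k : Nat) (v : Int),
        (a::b::c::d::e::f::g::h::i::rest)[k]? = some v →
        PySem.List.pyGet? (a::b::c::d::e::f::g::h::i::rest) (k : Int) = some v := by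
      intro k v hv
      rw [PySem.List.pyGet?_natCast]; exact hv
    have s0 := hget 0 a rfl
    have s1 := hget 1 b rfl
    have s2 := hget 2 c rfl
    have s5 := hget 5 f rfl
    have s6 := hget 6 g rfl
    have s7 := hget 7 h rfl
    have s8 := hget 8 i rfl
    rw [range07]
    simp only [List.foldl]
    unfold remapStep
    simp only [slot0, slot1, slot2, slot3, slot4, slot5, slot6, Option.getD_some]
    rw [if_pos (hc 0 (by norm_num)), if_pos (hc 1 (by norm_num)), if_pos (hc 2 (by norm_num)),
        if_pos (hc 5 (by norm_num)), if_pos (hc 6 (by norm_num)),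
        if_pos (hc 7 (by norm_num)), if_pos (hc 8 (by norm_num))]
    rw [show ((0:Nat) : Int) = (0:Int) from rfl] at s0
    rw [show ((1:Nat) : Int) = (1:Int) from rfl] at s1
    rw [show ((2:Nat) : Int) = (2:Int) from rfl] at s2
    rw [show ((5:Nat) : Int) = (5:Int) from rfl] at s5
    rw [show ((6:Nat) : Int) = (6:Int) from rfl] at s6
    rw [show ((7:Nat) : Int) = (7:Int) from rfl] at s7
    rw [show ((8:Nat) : Int) = (8:Int) from rfl] at s8
    rw [s0, s1, s2, s5, s6, s7, s8]
    rw [PySem.List.slice_to _ (b := 3) (by norm_num),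
        PySem.List.slice_toNat _ (a := 5) (b := 9) (by norm_num) (by norm_num)]
    simp

theorem padded_long (xs : List Int) :
    9 ≤ (xs ++ List.replicate (Int.toNat (9 - (xs.length : Int))) 0).length := by
  simp only [List.length_append, List.length_replicate]
  omega

-- ===== VERDICT (by name: the statement is the Claim_ definition above) =====
theorem remap_equips_spec : Claim_equal_remap_equips := by
  intro xs _
  unfold Spec_remap_equips remap_equips remap_equips_alt
  exact core _ (padded_long xs)
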